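-- pv_equiv track=rewrite | github.com/elkayem-cyber/Tp-Malek-Emric | exercice5.py | combinaisons_des
-- ===== SOURCE A (Python) =====
-- import itertools
--
-- def combinaisons_des(n):
--     if n < 5 or n > 30:
--         return None  # retourne None si l'argument n est invalide
--
--     combinaisons = []
--     for comb in itertools.product(range(1, 7), repeat=5):
--         if sum(comb) == n:
--             combinaisons.append(comb)
--
--     return combinaisons
-- ===== SOURCE B (Python) =====
-- def combinaisons_des(n):
--     if n < 5 or n > 30:
--         return None
--     res = []
--     def rec(pos, s, path):
--         if pos == 5:
--             if s == n:
--                 res.append(tuple(path))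
--             return
--         rem = 4 - pos  # dice left after this one
--         for face in range(1, 7):
--             t = s + face
--             if t + rem <= n <= t + 6 * rem:
--                 rec(pos + 1, t, path + [face])
--     rec(0, 0, [])
--     return res
-- ===== Notes on version B (the rewrite author's own statement) =====
-- stated objective: alternative
-- what changed: Replaces the exhaustive itertools.product scan over every face tuple with a recursive depth-first generator that prunes branches whose partial sum can no longer reach n, emitting tuples in the same lexicographic order.
import Mathlib
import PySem

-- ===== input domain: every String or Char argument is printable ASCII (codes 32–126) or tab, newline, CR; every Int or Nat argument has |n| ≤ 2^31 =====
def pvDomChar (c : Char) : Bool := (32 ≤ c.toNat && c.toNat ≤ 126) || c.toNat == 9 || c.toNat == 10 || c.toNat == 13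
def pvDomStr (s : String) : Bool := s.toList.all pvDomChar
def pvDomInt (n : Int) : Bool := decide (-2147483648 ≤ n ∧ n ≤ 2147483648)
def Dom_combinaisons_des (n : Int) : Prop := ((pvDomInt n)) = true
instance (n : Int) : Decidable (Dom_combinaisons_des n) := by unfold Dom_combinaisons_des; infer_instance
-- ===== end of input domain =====

-- B replaces A's exhaustive itertools.product scan by a pruned depth-first recursion; same output, same order.

-- ===== PORT A =====
-- itertools.product(range(1,7), repeat=5): lexicographic list of all 5-tuples of faces
def pyProduct5 : List (Int × Int × Int × Int × Int) :=
  (PySem.List.pyRange 1 7 1).flatMap fun a =>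
    (PySem.List.pyRange 1 7 1).flatMap fun b =>
      (PySem.List.pyRange 1 7 1).flatMap fun c =>
        (PySem.List.pyRange 1 7 1).flatMap fun d =>
          (PySem.List.pyRange 1 7 1).map fun e => (a, b, c, d, e)

def combinaisons_des (n : Int) : Option (List (Int × Int × Int × Int × Int)) :=
  if n < 5 ∨ n > 30 then none
  else
    some (pyProduct5.foldl (fun acc comb =>
      if comb.1 + comb.2.1 + comb.2.2.1 + comb.2.2.2.1 + comb.2.2.2.2 = n
      then acc ++ [comb] else acc) [])

-- ===== PORT B =====
-- tuple(path): path always has length 5 where this is applied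
def pvTuple5 (l : List Int) : Int × Int × Int × Int × Int :=
  match l with
  | [a, b, c, d, e] => (a, b, c, d, e)
  | _ => (0, 0, 0, 0, 0)

-- rec(pos, s, path) with fuel = 5 - pos dice still to place; prunes branches that cannot reach n
def pvRec (n : Int) : Nat → Int → List Int → List (Int × Int × Int × Int × Int)
  | 0, s, path => if s = n then [pvTuple5 path] else []
  | f + 1, s, path =>
    (PySem.List.pyRange 1 7 1).foldl (fun acc face =>
      let t := s + face
      if t + (f : Int) ≤ n ∧ n ≤ t + 6 * (f : Int)
      then acc ++ pvRec n f t (path ++ [face]) else acc) []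

def combinaisons_des_alt (n : Int) : Option (List (Int × Int × Int × Int × Int)) :=
  if n < 5 ∨ n > 30 then none
  else some (pvRec n 5 0 [])

-- ===== PRECONDITION & SPEC =====
def Spec_combinaisons_des (n : Int) (out : Option (List (Int × Int × Int × Int × Int))) : Prop := out = combinaisons_des_alt n
instance (n : Int) (out : Option (List (Int × Int × Int × Int × Int))) : Decidable (Spec_combinaisons_des n out) := by unfold Spec_combinaisons_des; infer_instance

-- ===== CLAIM (what is proved, stated in full; the proofs are below) =====
def Claim_equal_combinaisons_des : Prop := ∀ (n : Int), Dom_combinaisons_des n → Spec_combinaisons_des n (combinaisons_des n)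

-- ===== LEMMAS AND PROOFS =====

-- all lists of length f over faces 1..6, in lexicographic order
def pvTuples : Nat → List (List Int)
  | 0 => [[]]
  | f + 1 => (PySem.List.pyRange 1 7 1).flatMap fun a => (pvTuples f).map (a :: ·)

theorem pvFlatMap_congr_mem {α β : Type} {l : List α} {f g : α → List β}
    (h : ∀ a ∈ l, f a = g a) : l.flatMap f = l.flatMap g := by
  induction l with
  | nil => rfl
  | cons x xs ih =>
    simp only [List.flatMap_cons]
    rw [h x (by simp), ih (fun a ha => h a (by simp [ha]))]

theorem pvTuples_sum_bounds (f : Nat) : ∀ l ∈ pvTuples f, (f : Int) ≤ l.sum ∧ l.sum ≤ 6 * f := by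
  induction f with
  | zero => intro l hl; simp only [pvTuples, List.mem_singleton] at hl; subst hl; simp
  | succ f ih =>
    intro l hl
    simp only [pvTuples, List.mem_flatMap, List.mem_map] at hl
    obtain ⟨a, ha, l', hl', rfl⟩ := hl
    rw [PySem.List.mem_pyRange_one] at ha
    have := ih l' hl'
    simp only [List.sum_cons]
    push_cast
    omega

theorem pvRec_eq (n : Int) (f : Nat) : ∀ (s : Int) (path : List Int),
    pvRec n f s path
      = ((pvTuples f).filter (fun l => decide (s + l.sum = n))).map
          (fun l => pvTuple5 (path ++ l)) := by
  induction f with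
  | zero =>
    intro s path
    by_cases h : s = n <;> simp [pvRec, pvTuples, List.filter, h]
  | succ f ih =>
    intro s path
    have hbody : (fun (acc : List (Int × Int × Int × Int × Int)) (face : Int) =>
        let t := s + face
        if t + (f : Int) ≤ n ∧ n ≤ t + 6 * (f : Int)
        then acc ++ pvRec n f t (path ++ [face]) else acc)
        = (fun acc face => acc ++
            (if s + face + (f : Int) ≤ n ∧ n ≤ s + face + 6 * (f : Int)
             then pvRec n f (s + face) (path ++ [face]) else [])) := by
      funext acc face
      by_cases h : s + face + (f : Int) ≤ n ∧ n ≤ s + face + 6 * (f : Int) <;> simp [h]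
    have hface : ∀ a ∈ PySem.List.pyRange 1 7 1,
        (if s + a + (f : Int) ≤ n ∧ n ≤ s + a + 6 * (f : Int)
         then pvRec n f (s + a) (path ++ [a]) else [])
        = ((pvTuples f).filter (fun l => decide (s + a + l.sum = n))).map
            (fun l => pvTuple5 (path ++ a :: l)) := by
      intro a _
      by_cases h : s + a + (f : Int) ≤ n ∧ n ≤ s + a + 6 * (f : Int)
      · rw [if_pos h, ih]
        simp [List.append_assoc, add_assoc]
      · rw [if_neg h]
        rw [List.filter_eq_nil_iff.mpr, List.map_nil]
        intro l hl
        have hb := pvTuples_sum_bounds f l hl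
        simp only [decide_eq_true_eq]
        omega
    show (PySem.List.pyRange 1 7 1).foldl _ [] = _
    rw [hbody, PySem.List.foldl_append_eq_flatMap, List.nil_append,
        pvFlatMap_congr_mem hface]
    simp only [pvTuples]
    rw [List.filter_flatMap]
    rw [List.map_flatMap]
    apply pvFlatMap_congr_mem
    intro a _
    rw [List.filter_map, List.map_map]
    simp only [Function.comp_def, List.sum_cons, ← add_assoc]

theorem pyProduct5_eq : pyProduct5 = (pvTuples 5).map pvTuple5 := by
  simp only [pyProduct5, pvTuples, List.map_flatMap, List.map_cons, List.map_nil]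
  rfl

theorem pvTuples_length (f : Nat) : ∀ l ∈ pvTuples f, l.length = f := by
  induction f with
  | zero => intro l hl; simp only [pvTuples, List.mem_singleton] at hl; subst hl; rfl
  | succ f ih =>
    intro l hl
    simp only [pvTuples, List.mem_flatMap, List.mem_map] at hl
    obtain ⟨a, _, l', hl', rfl⟩ := hl
    simp [ih l' hl']

theorem pvLen5 {l : List Int} (h : l.length = 5) : ∃ a b c d e, l = [a, b, c, d, e] := by
  match l with
  | [a, b, c, d, e] => exact ⟨a, b, c, d, e, rfl⟩
  | [] | [_] | [_, _] | [_, _, _] | [_, _, _, _] => simp at h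
  | _ :: _ :: _ :: _ :: _ :: _ :: _ => simp at h

-- ===== VERDICT (by name: the statement is the Claim_ definition above) =====
theorem combinaisons_des_spec : Claim_equal_combinaisons_des := by
  intro n _
  unfold Spec_combinaisons_des combinaisons_des combinaisons_des_alt
  by_cases h : n < 5 ∨ n > 30
  · rw [if_pos h, if_pos h]
  · rw [if_neg h, if_neg h]
    rw [pvRec_eq, PySem.List.foldl_append_ite_eq_filter, List.nil_append,
        pyProduct5_eq, List.filter_map]
    apply congrArg
    apply congrArg₂ _ rfl ?_
    apply List.filter_congr
    intro l hl
    obtain ⟨a, b, c, d, e, rfl⟩ := pvLen5 (pvTuples_length 5 l hl)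
    simp only [Function.comp_apply, pvTuple5, List.sum_cons, List.sum_nil,
      decide_eq_decide]
    omega
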